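-- pv_equiv track=rewrite | github.com/nlaarh/FSLDashboard | backend/dispatch.py | _classify_driver
-- ===== SOURCE A (Python) =====
-- TOW_SKILLS = {'tow', 'flat bed', 'wheel lift'}
--
-- LIGHT_SKILLS = {'tire', 'lockout', 'locksmith', 'winch out', 'fuel / miscellaneous', 'pvs'}
--
-- BATTERY_SKILLS = {'battery', 'jumpstart'}
--
-- def _classify_driver(skills_set):
--     lower = {s.lower() for s in skills_set}
--     if lower & TOW_SKILLS:
--         return 'tow'
--     if lower & LIGHT_SKILLS:
--         return 'light'
--     if lower & BATTERY_SKILLS: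
--         return 'battery'
--     return 'unknown'
-- ===== SOURCE B (Python) =====
-- _SKILL_RANK = {
--     'tow': ('tow', 0), 'flat bed': ('tow', 0), 'wheel lift': ('tow', 0),
--     'tire': ('light', 1), 'lockout': ('light', 1), 'locksmith': ('light', 1),
--     'winch out': ('light', 1), 'fuel / miscellaneous': ('light', 1), 'pvs': ('light', 1),
--     'battery': ('battery', 2), 'jumpstart': ('battery', 2),
-- }
--
-- def _classify_driver(skills_set):
--     best = None
--     for s in skills_set:
--         hit = _SKILL_RANK.get(s.lower())
--         if hit is not None and (best is None or hit[1] < best[1]):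
--             best = hit
--     return best[0] if best is not None else 'unknown'
-- ===== Notes on version B (the rewrite author's own statement) =====
-- stated objective: idiomatic
-- what changed: Replaces building a lowered set and taking three set intersections with a single pass over the skills using one skill->(category,rank) dict, keeping the best (lowest-rank) category seen.
import Mathlib
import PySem

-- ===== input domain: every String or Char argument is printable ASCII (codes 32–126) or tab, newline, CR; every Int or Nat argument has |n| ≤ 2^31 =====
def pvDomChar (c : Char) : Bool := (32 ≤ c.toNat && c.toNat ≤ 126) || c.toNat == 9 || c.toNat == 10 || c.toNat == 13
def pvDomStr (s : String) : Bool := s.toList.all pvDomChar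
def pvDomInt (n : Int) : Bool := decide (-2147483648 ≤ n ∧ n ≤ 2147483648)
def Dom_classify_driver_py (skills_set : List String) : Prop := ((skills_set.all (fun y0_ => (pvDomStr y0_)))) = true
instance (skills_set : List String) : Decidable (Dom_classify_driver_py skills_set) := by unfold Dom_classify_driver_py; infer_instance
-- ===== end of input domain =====

-- B replaces the lowered set and three set intersections with a single pass over the
-- skills using one skill -> (category, rank) dict, keeping the lowest-rank category seen.

-- ===== PORT A =====
def TOW_SKILLS : PySem.Set String := PySem.Set.ofList ["tow", "flat bed", "wheel lift"]
def LIGHT_SKILLS : PySem.Set String :=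
  PySem.Set.ofList ["tire", "lockout", "locksmith", "winch out", "fuel / miscellaneous", "pvs"]
def BATTERY_SKILLS : PySem.Set String := PySem.Set.ofList ["battery", "jumpstart"]

def classify_driver_py (skills_set : List String) : String :=
  let lower : PySem.Set String := PySem.Set.ofList (skills_set.map PySem.Str.lower)
  if PySem.Set.inter lower TOW_SKILLS ≠ [] then "tow"
  else if PySem.Set.inter lower LIGHT_SKILLS ≠ [] then "light"
  else if PySem.Set.inter lower BATTERY_SKILLS ≠ [] then "battery"
  else "unknown"

-- ===== PORT B =====
def SKILL_RANK : PySem.Dict String (String × Int) := PySem.Dict.mk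
  [("tow", ("tow", 0)), ("flat bed", ("tow", 0)), ("wheel lift", ("tow", 0)),
   ("tire", ("light", 1)), ("lockout", ("light", 1)), ("locksmith", ("light", 1)),
   ("winch out", ("light", 1)), ("fuel / miscellaneous", ("light", 1)), ("pvs", ("light", 1)),
   ("battery", ("battery", 2)), ("jumpstart", ("battery", 2))]

def classify_driver_py_alt (skills_set : List String) : String :=
  let best : Option (String × Int) := skills_set.foldl
    (fun best s =>
      match SKILL_RANK.get? (PySem.Str.lower s) with
      | none => best
      | some hit =>
        match best with
        | none => some hit
        | some b => if hit.2 < b.2 then some hit else some b)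
    none
  match best with
  | some b => b.1
  | none => "unknown"

-- ===== PRECONDITION & SPEC =====
def Spec_classify_driver_py (skills_set : List String) (out : String) : Prop := out = classify_driver_py_alt skills_set
instance (skills_set : List String) (out : String) : Decidable (Spec_classify_driver_py skills_set out) := by unfold Spec_classify_driver_py; infer_instance

-- ===== CLAIM (what is proved, stated in full; the proofs are below) =====
def Claim_equal_classify_driver_py : Prop := ∀ (skills_set : List String), Dom_classify_driver_py skills_set → Spec_classify_driver_py skills_set (classify_driver_py skills_set)

-- ===== LEMMAS AND PROOFS =====

-- does some skill, lowered, land in the given set?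
def pvHas (t : List String) (xs : List String) : Bool :=
  xs.any (fun s => t.contains (PySem.Str.lower s))

def pvTow : List String := ["tow", "flat bed", "wheel lift"]
def pvLight : List String := ["tire", "lockout", "locksmith", "winch out", "fuel / miscellaneous", "pvs"]
def pvBatt : List String := ["battery", "jumpstart"]

lemma skill_rank_get (k : String) :
    SKILL_RANK.get? k =
      if pvTow.contains k then some ("tow", 0)
      else if pvLight.contains k then some ("light", 1)
      else if pvBatt.contains k then some ("battery", 2)
      else none := by
  by_cases h1 : k = "tow"
  · subst h1; rfl
  by_cases h2 : k = "flat bed"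
  · subst h2; rfl
  by_cases h3 : k = "wheel lift"
  · subst h3; rfl
  by_cases h4 : k = "tire"
  · subst h4; rfl
  by_cases h5 : k = "lockout"
  · subst h5; rfl
  by_cases h6 : k = "locksmith"
  · subst h6; rfl
  by_cases h7 : k = "winch out"
  · subst h7; rfl
  by_cases h8 : k = "fuel / miscellaneous"
  · subst h8; rfl
  by_cases h9 : k = "pvs"
  · subst h9; rfl
  by_cases h10 : k = "battery"
  · subst h10; rfl
  by_cases h11 : k = "jumpstart"
  · subst h11; rfl
  simp [SKILL_RANK, PySem.Dict.get?, pvTow, pvLight, pvBatt, Ne.symm h1, Ne.symm h2, Ne.symm h3, Ne.symm h4, Ne.symm h5, Ne.symm h6, Ne.symm h7, Ne.symm h8, Ne.symm h9, Ne.symm h10, Ne.symm h11, h1, h2, h3, h4, h5, h6, h7, h8, h9, h10, h11]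

lemma inter_ne_nil (l t : List String) :
    (PySem.Set.inter (PySem.Set.ofList l) t ≠ []) ↔ (l.any (fun x => t.contains x) = true) := by
  simp [PySem.Set.inter, List.filter_eq_nil_iff, List.any_eq_true, PySem.Set.mem_ofList]

lemma has_eq (t xs : List String) :
    ((xs.map PySem.Str.lower).any (fun x => t.contains x) = true) ↔ (pvHas t xs = true) := by
  simp [pvHas, List.any_map, Function.comp]

lemma a_characterization (xs : List String) :
    classify_driver_py xs =
      if pvHas pvTow xs then "tow"
      else if pvHas pvLight xs then "light"
      else if pvHas pvBatt xs then "battery"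
      else "unknown" := by
  unfold classify_driver_py
  simp only [show TOW_SKILLS = pvTow from rfl, show LIGHT_SKILLS = pvLight from rfl,
    show BATTERY_SKILLS = pvBatt from rfl, inter_ne_nil, has_eq]

lemma b_fold (xs : List String) (b : Option (String × Int))
    (hb : b = none ∨ b = some ("tow", 0) ∨ b = some ("light", 1) ∨ b = some ("battery", 2)) :
    xs.foldl
      (fun best s =>
        match SKILL_RANK.get? (PySem.Str.lower s) with
        | none => best
        | some hit =>
          match best with
          | none => some hit
          | some b => if hit.2 < b.2 then some hit else some b)
      b =
      (if b = some ("tow", 0) ∨ pvHas pvTow xs then some ("tow", 0)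
       else if b = some ("light", 1) ∨ pvHas pvLight xs then some ("light", 1)
       else if b = some ("battery", 2) ∨ pvHas pvBatt xs then some ("battery", 2)
       else none) := by
  induction xs generalizing b with
  | nil => rcases hb with rfl | rfl | rfl | rfl <;> simp [pvHas]
  | cons s xs ih =>
    rw [List.foldl_cons]
    have ihT := ih (some ("tow", 0)) (Or.inr (Or.inl rfl))
    have ihL := ih (some ("light", 1)) (Or.inr (Or.inr (Or.inl rfl)))
    have ihB := ih (some ("battery", 2)) (Or.inr (Or.inr (Or.inr rfl)))
    have ihN := ih none (Or.inl rfl)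
    clear ih
    rw [skill_rank_get]
    by_cases hT : pvTow.contains (PySem.Str.lower s) = true
    · rw [if_pos hT]
      have hT' : PySem.Str.lower s ∈ pvTow := by simpa using hT
      rcases hb with rfl | rfl | rfl | rfl <;>
        norm_num [ihN, ihT, ihL, ihB, pvHas, List.any_cons, hT, hT']
    · rw [if_neg hT]
      have hT' : ¬ PySem.Str.lower s ∈ pvTow := by simpa using hT
      by_cases hL : pvLight.contains (PySem.Str.lower s) = true
      · rw [if_pos hL]
        have hL' : PySem.Str.lower s ∈ pvLight := by simpa using hL
        rcases hb with rfl | rfl | rfl | rfl <;>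
          norm_num [ihN, ihT, ihL, ihB, pvHas, List.any_cons, hT, hL, hT', hL'] <;> try simp
      · rw [if_neg hL]
        have hL' : ¬ PySem.Str.lower s ∈ pvLight := by simpa using hL
        by_cases hB : pvBatt.contains (PySem.Str.lower s) = true
        · rw [if_pos hB]
          have hB' : PySem.Str.lower s ∈ pvBatt := by simpa using hB
          rcases hb with rfl | rfl | rfl | rfl <;>
            norm_num [ihN, ihT, ihL, ihB, pvHas, List.any_cons, hT, hL, hB, hT', hL', hB'] <;> try simp
        · rw [if_neg hB]
          have hB' : ¬ PySem.Str.lower s ∈ pvBatt := by simpa using hB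
          rcases hb with rfl | rfl | rfl | rfl <;>
            norm_num [ihN, ihT, ihL, ihB, pvHas, List.any_cons, hT, hL, hB, hT', hL', hB']

lemma b_characterization (xs : List String) :
    classify_driver_py_alt xs =
      if pvHas pvTow xs then "tow"
      else if pvHas pvLight xs then "light"
      else if pvHas pvBatt xs then "battery"
      else "unknown" := by
  unfold classify_driver_py_alt
  rw [b_fold xs none (Or.inl rfl)]
  by_cases hT : pvHas pvTow xs <;> by_cases hL : pvHas pvLight xs <;>
    by_cases hB : pvHas pvBatt xs <;> simp [hT, hL, hB]

-- ===== VERDICT (by name: the statement is the Claim_ definition above) =====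
theorem classify_driver_py_spec : Claim_equal_classify_driver_py := by
  intro xs _
  unfold Spec_classify_driver_py
  rw [a_characterization, b_characterization]
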